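-- pv_equiv track=rewrite | github.com/zzhx1/Hetaceso-ModelLink | modellink/tasks/preprocess/data_handler.py | _get_data_format
-- ===== SOURCE A (Python) =====
-- def _get_data_format(files):
--     """get format with largest number"""
--     all_support_format = {
--         'parquet': 'parquet',
--         'arrow': 'arrow',
--         'csv': 'csv',
--         'json': 'json',
--         'jsonl': 'json',
--         'txt': 'text'
--     }
--     format_num = {}
--     for file in files:
--         ext = file.split('.')[-1]
--         format_num[ext] = format_num.get(ext, 0) + 1
--     exts_with_num = sorted(format_num.items(), key=lambda x: x[1], reverse=True)
--     has_data_file = False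
--     for ext, _ in exts_with_num:
--         if ext in all_support_format:
--             has_data_file = True
--             break
--     return (ext, all_support_format.get(ext)) if has_data_file else (None, None)
-- ===== SOURCE B (Python) =====
-- def _get_data_format(files):
--     """get format with largest number"""
--     all_support_format = {
--         'parquet': 'parquet',
--         'arrow': 'arrow',
--         'csv': 'csv',
--         'json': 'json',
--         'jsonl': 'json',
--         'txt': 'text'
--     }
--     format_num = {}
--     for file in files:
--         ext = file.split('.')[-1]
--         format_num[ext] = format_num.get(ext, 0) + 1
--     best = None
--     for ext, num in format_num.items():
--         if ext in all_support_format and (best is None or num > best[1]):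
--             best = (ext, num)
--     if best is None:
--         return (None, None)
--     return (best[0], all_support_format[best[0]])
-- ===== Notes on version B (the rewrite author's own statement) =====
-- stated objective: simpler
-- what changed: B keeps the extension-count loop but replaces A's sort-of-the-count-items-then-scan-for-the-first-supported-extension by a single linear max-scan over the dict items with a strict '>' update, which reproduces the stable reverse sort's first-seen tie-break without sorting.
import Mathlib
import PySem

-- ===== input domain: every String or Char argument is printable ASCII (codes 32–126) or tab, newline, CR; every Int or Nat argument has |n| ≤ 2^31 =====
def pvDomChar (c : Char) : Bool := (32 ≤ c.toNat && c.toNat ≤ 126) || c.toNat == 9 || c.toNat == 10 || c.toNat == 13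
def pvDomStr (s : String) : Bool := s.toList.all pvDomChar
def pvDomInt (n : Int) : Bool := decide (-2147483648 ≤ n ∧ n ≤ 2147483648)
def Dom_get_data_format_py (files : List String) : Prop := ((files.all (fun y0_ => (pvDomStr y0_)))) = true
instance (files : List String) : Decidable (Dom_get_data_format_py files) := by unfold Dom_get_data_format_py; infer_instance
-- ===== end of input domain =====

-- B replaces A's sort-then-scan over the extension counts by a single strict-'>' max-scan
-- (first maximal supported extension wins, matching the stable reverse sort); objective: simpler.

-- ===== PORT A =====

-- all_support_format (same literal dict in both Pythons)
def pvAllSupport : PySem.Dict String String :=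
  PySem.Dict.ofList [("parquet", "parquet"), ("arrow", "arrow"), ("csv", "csv"),
                     ("json", "json"), ("jsonl", "json"), ("txt", "text")]

-- file.split('.')[-1]  (split? is none only for sep = ""; split('.') is never empty, so
-- neither getD default is ever reached)
def pvExtOf (file : String) : String :=
  (PySem.List.pyGet? ((PySem.Str.split? file ".").getD []) (-1)).getD ""

-- the counting loop, verbatim in both Pythons: format_num[ext] = format_num.get(ext, 0) + 1
def pvFormatNum (files : List String) : PySem.Dict String Int :=
  files.foldl (fun d file => d.insert (pvExtOf file) (d.getD (pvExtOf file) 0 + 1)) PySem.Dict.empty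

-- A's break-loop: the first ext in the (sorted) list with ext in all_support_format;
-- none ⇔ has_data_file stays False (then A's conditional never evaluates `ext`)
def pvFirstSupported : List (String × Int) → Option String
  | [] => none
  | (ext, _) :: rest => if pvAllSupport.contains ext then some ext else pvFirstSupported rest

def get_data_format_py (files : List String) : Option String × Option String :=
  let exts_with_num := PySem.List.sorted (pvFormatNum files).items (fun x => x.2) true
  match pvFirstSupported exts_with_num with
  | some ext => (some ext, pvAllSupport.get? ext)
  | none => (none, none)

-- ===== PORT B =====

-- B's loop body: if ext in all_support_format and (best is None or num > best[1]): best = (ext, num)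
def pvStep (best : Option (String × Int)) (p : String × Int) : Option (String × Int) :=
  if pvAllSupport.contains p.1 && (match best with
                                   | none => true
                                   | some b => decide (b.2 < p.2)) then some p else best

def get_data_format_py_alt (files : List String) : Option String × Option String :=
  match (pvFormatNum files).items.foldl pvStep none with
  | some best => (some best.1, pvAllSupport.get? best.1)
  | none => (none, none)

-- ===== PRECONDITION & SPEC =====
def Spec_get_data_format_py (files : List String) (out : Option String × Option String) : Prop := out = get_data_format_py_alt files
instance (files : List String) (out : Option String × Option String) : Decidable (Spec_get_data_format_py files out) := by unfold Spec_get_data_format_py; infer_instance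

-- ===== CLAIM (what is proved, stated in full; the proofs are below) =====
def Claim_equal_get_data_format_py : Prop := ∀ (files : List String), Dom_get_data_format_py files → Spec_get_data_format_py files (get_data_format_py files)

-- ===== LEMMAS AND PROOFS =====

-- the supported-test, shared by both sides in the proofs
def pvP (p : String × Int) : Bool := pvAllSupport.contains p.1

lemma pvFirstSupported_eq_find? (l : List (String × Int)) :
    pvFirstSupported l = (List.find? pvP l).map Prod.fst := by
  induction l with
  | nil => rfl
  | cons p rest ih =>
    obtain ⟨e, n⟩ := p
    by_cases h : pvAllSupport.contains e
    · simp [pvFirstSupported, List.find?, pvP, h]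
    · simp only [pvFirstSupported, List.find?, pvP] at *
      simp [h, ih]

-- inserting x into a list sorted non-increasingly by count: the first supported element
-- of the result is exactly B's update of the first supported element of the old list
lemma find?_insertBy (x : String × Int) (s : List (String × Int))
    (hs : s.Pairwise (fun a b => b.2 ≤ a.2)) :
    List.find? pvP (PySem.List.insertBy (fun a b => decide (b.2 < a.2)) x s)
      = pvStep (List.find? pvP s) x := by
  induction s with
  | nil =>
    by_cases hx : pvP x <;> simp_all [PySem.List.insertBy, List.find?, pvStep, pvP]
  | cons y ys ih =>
    have hys : ys.Pairwise (fun a b => b.2 ≤ a.2) := hs.sublist (List.sublist_cons_self y ys)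
    have hyle : ∀ b ∈ ys, b.2 ≤ y.2 := fun b hb => (List.pairwise_cons.mp hs).1 b hb
    by_cases hlt : y.2 < x.2
    · -- x goes in front of y :: ys
      have hfront : PySem.List.insertBy (fun a b => decide (b.2 < a.2)) x (y :: ys)
          = x :: y :: ys := by simp [PySem.List.insertBy, hlt]
      rw [hfront]
      by_cases hx : pvP x
      · -- x is supported and strictly beats every element of y :: ys
        have hgt : ∀ b ∈ y :: ys, b.2 < x.2 := by
          intro b hb
          rcases List.mem_cons.mp hb with h | h
          · simpa [h] using hlt
          · exact lt_of_le_of_lt (hyle b h) hlt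
        rcases hfind : List.find? pvP (y :: ys) with _ | b
        · simp [List.find?_cons, pvStep, pvP, hfind] at *
          simp_all
        · have hb : b ∈ y :: ys := List.mem_of_find?_eq_some hfind
          have : b.2 < x.2 := hgt b hb
          simp only [List.find?_cons] at *
          simp [pvStep, pvP, hfind, this] at *
          simp_all
      · have hx' : pvP x = false := by simpa using hx
        simp [List.find?_cons, pvStep, pvP] at *
        simp_all
    · -- x goes behind y
      have hbehind : PySem.List.insertBy (fun a b => decide (b.2 < a.2)) x (y :: ys)
          = y :: PySem.List.insertBy (fun a b => decide (b.2 < a.2)) x ys := by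
        simp [PySem.List.insertBy, hlt]
      rw [hbehind]
      by_cases hy : pvP y
      · -- first supported stays y; x cannot beat it (x.2 ≤ y.2)
        have hxle : x.2 ≤ y.2 := le_of_not_gt hlt
        simp [List.find?_cons, pvStep, pvP, not_lt.mpr hxle] at *
        simp_all [not_lt.mpr hxle]
      · have hy' : pvP y = false := by simpa using hy
        simp only [List.find?_cons, hy']
        exact ih hys
-- A's first supported element of the reverse-sorted list equals B's max-scan fold
lemma find?_sorted_eq_foldl (l : List (String × Int)) :
    List.find? pvP (PySem.List.sorted l (fun x => x.2) true) = l.foldl pvStep none := by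
  induction l using List.reverseRecOn with
  | nil => rfl
  | append_singleton l x ih =>
    have hsorted : PySem.List.sorted (l ++ [x]) (fun x => x.2) true
        = PySem.List.insertBy (fun a b => decide (b.2 < a.2)) x
            (PySem.List.sorted l (fun x => x.2) true) := by
      rw [PySem.List.sorted_rev_eq_foldl_insertBy, PySem.List.sorted_rev_eq_foldl_insertBy,
        List.foldl_append]
      rfl
    rw [hsorted, List.foldl_append,
      find?_insertBy x _ (PySem.List.sorted_pairwise_rev l (fun x => x.2)), ih]
    rfl

-- ===== VERDICT (by name: the statement is the Claim_ definition above) =====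
theorem get_data_format_py_spec : Claim_equal_get_data_format_py := by
  intro files _
  unfold Spec_get_data_format_py get_data_format_py get_data_format_py_alt
  simp only [pvFirstSupported_eq_find?, find?_sorted_eq_foldl]
  rcases (pvFormatNum files).items.foldl pvStep none with _ | ⟨e, n⟩ <;> simp
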